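-- pv_equiv track=rewrite | github.com/MrBrantCode/unitest_baseline | mut_generate/mist_train_taco/taco_15001/solution.py | max_color_sum
-- ===== SOURCE A (Python) =====
-- def max_color_sum(n, a):
--     # Create a dictionary to store the last occurrence index of each value
--     last_occurrence = {x: i for i, x in enumerate(a)}
--
--     # Initialize variables
--     max_last_index = 0
--     current_last_index = 0
--     color_sum = 0
--
--     # Iterate through the list of values
--     for i, x in enumerate(a):
--         # Update the maximum last index seen so far
--         max_last_index = max(max_last_index, last_occurrence[x])
--
--         # If the current index is less than the last index of the current value,
--         # it means we can apply the operation and increment the color sum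
--         if current_last_index > i:
--             color_sum += 1
--         else:
--             # Update the current last index to the maximum last index seen so far
--             current_last_index = max_last_index
--
--     return color_sum
-- ===== SOURCE B (Python) =====
-- def max_color_sum(n, a):
--     # Pointer-jumping: sum interior lengths of greedy segments directly,
--     # hopping from one segment boundary to the next instead of testing every index.
--     last = {x: i for i, x in enumerate(a)}
--     P = []
--     m = 0
--     for x in a:
--         m = max(m, last[x])
--         P.append(m)
--     total = 0
--     s = 0
--     while s < len(a):
--         e = P[s]
--         if e <= s:
--             s += 1
--         else:
--             total += e - s - 1
--             s = e
--     return total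
-- ===== Notes on version B (the rewrite author's own statement) =====
-- stated objective: alternative
-- what changed: B precomputes the prefix-max-of-last-occurrence table and then pointer-jumps from one greedy segment boundary directly to the next, summing interior lengths (e-s-1) per hop, instead of A's single fused pass that tests every index against a frozen reach and increments a counter.
import Mathlib
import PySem

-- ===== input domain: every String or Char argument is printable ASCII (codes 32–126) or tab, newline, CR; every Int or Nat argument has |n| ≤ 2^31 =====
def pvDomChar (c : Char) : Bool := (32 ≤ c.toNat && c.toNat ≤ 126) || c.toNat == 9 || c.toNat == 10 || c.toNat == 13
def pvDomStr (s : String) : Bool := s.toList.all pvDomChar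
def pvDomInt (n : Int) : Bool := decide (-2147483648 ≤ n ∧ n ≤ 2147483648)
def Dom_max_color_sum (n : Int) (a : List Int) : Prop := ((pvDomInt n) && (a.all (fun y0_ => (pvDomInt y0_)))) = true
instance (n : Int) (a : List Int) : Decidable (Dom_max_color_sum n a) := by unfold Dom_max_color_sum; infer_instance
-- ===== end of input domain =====

-- B replaces A's per-index conditional counter by pointer-jumping over a precomputed prefix-max table, summing segment interior lengths directly; objective: alternative decomposition, same asymptotic cost.


-- ===== PORT A =====
-- last_occurrence = {x: i for i, x in enumerate(a)}
def pvLastOcc (a : List Int) : PySem.Dict Int Int :=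
  (PySem.List.enumerate a).foldl (fun d p => d.insert p.2 (p.1 : Int)) PySem.Dict.empty

-- A's for-loop over enumerate(a); state (i, max_last_index, current_last_index, color_sum).
-- last_occurrence[x] is always present (every x ∈ a), so .getD 0 is exact here.
def pvALoop (d : PySem.Dict Int Int) : List Int → Int → Int → Int → Int → Int
  | [], _, _, _, cs => cs
  | x :: xs, i, mli, cli, cs =>
    let mli' := max mli ((d.get? x).getD 0)
    if cli > i then pvALoop d xs (i + 1) mli' cli (cs + 1)
    else pvALoop d xs (i + 1) mli' mli' cs

def max_color_sum (n : Int) (a : List Int) : Int :=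
  pvALoop (pvLastOcc a) a 0 0 0 0

-- ===== PORT B =====
def pvLastOccB (a : List Int) : PySem.Dict Int Int :=
  (PySem.List.enumerate a).foldl (fun d p => d.insert p.2 (p.1 : Int)) PySem.Dict.empty

-- P: prefix maxima of last[x] (accumulator m, initially 0)
def pvBuildP (d : PySem.Dict Int Int) : List Int → Int → List Int
  | [], _ => []
  | x :: xs, m =>
    let m' := max m ((d.get? x).getD 0)
    m' :: pvBuildP d xs m'

-- B's while loop: hop s → e = P[s] (or s+1), adding the interior length e - s - 1
def pvJump (P : List Int) (s : Nat) : Int :=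
  if h : s < P.length then
    let e := P[s]
    if e ≤ (s : Int) then pvJump P (s + 1)
    else (e - (s : Int) - 1) + pvJump P e.toNat
  else 0
termination_by P.length - s
decreasing_by
  · omega
  · omega

def max_color_sum_alt (n : Int) (a : List Int) : Int :=
  pvJump (pvBuildP (pvLastOccB a) a 0) 0

-- ===== PRECONDITION & SPEC =====
def Spec_max_color_sum (n : Int) (a : List Int) (out : Int) : Prop := out = max_color_sum_alt n a
instance (n : Int) (a : List Int) (out : Int) : Decidable (Spec_max_color_sum n a out) := by unfold Spec_max_color_sum; infer_instance

-- ===== CLAIM (what is proved, stated in full; the proofs are below) =====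
def Claim_equal_max_color_sum : Prop := ∀ (n : Int) (a : List Int), Dom_max_color_sum n a → Spec_max_color_sum n a (max_color_sum n a)

-- ===== LEMMAS AND PROOFS =====

-- Abstract form of A's loop over the precomputed prefix-max list P (proof device)
def pvScan : List Int → Int → Int → Int
  | [], _, _ => 0
  | p :: ps, i, reach =>
    if reach > i then 1 + pvScan ps (i + 1) reach
    else pvScan ps (i + 1) p

-- Step 1: A's fused loop equals the counter scan over the prefix-max list
lemma pvALoop_scan (d : PySem.Dict Int Int) (xs : List Int) :
    ∀ (i mli cli cs : Int),
      pvALoop d xs i mli cli cs = cs + pvScan (pvBuildP d xs mli) i cli := by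
  induction xs with
  | nil => intro i mli cli cs; simp [pvALoop, pvBuildP, pvScan]
  | cons x xs ih =>
    intro i mli cli cs
    simp only [pvALoop, pvBuildP, pvScan]
    by_cases hc : cli > i
    · rw [if_pos hc, if_pos hc, ih]; ring
    · rw [if_neg hc, if_neg hc, ih]

lemma pvBuildP_length (d : PySem.Dict Int Int) (xs : List Int) (m : Int) :
    (pvBuildP d xs m).length = xs.length := by
  induction xs generalizing m with
  | nil => simp [pvBuildP]
  | cons x xs ih => simp [pvBuildP, ih]

-- all elements of pvBuildP are bounded by max of m and a bound on the dict lookups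
lemma pvBuildP_bound (d : PySem.Dict Int Int) (B : Int)
    (hd : ∀ x, ((d.get? x).getD 0) ≤ B) (xs : List Int) :
    ∀ (m : Int), m ≤ B → ∀ p ∈ pvBuildP d xs m, p ≤ B := by
  induction xs with
  | nil => intro m _ p hp; simp [pvBuildP] at hp
  | cons x xs ih =>
    intro m hm p hp
    simp only [pvBuildP, List.mem_cons] at hp
    have hm' : max m ((d.get? x).getD 0) ≤ B := by
      have := hd x; omega
    rcases hp with h | h
    · omega
    · exact ih _ hm' p h

-- every value stored in the last-occurrence dict is an index of a, hence < a.length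
lemma pvLastOcc_bound (a : List Int) (x : Int) :
    ((pvLastOcc a).get? x).getD 0 ≤ (a.length : Int) := by
  have key : ∀ (l : List (Int × Int)) (d : PySem.Dict Int Int) (B : Int),
      0 ≤ B → (∀ y, ((d.get? y).getD 0) ≤ B) → (∀ p ∈ l, (p.1 : Int) ≤ B) →
      ∀ y, (((l.foldl (fun d p => d.insert p.2 (p.1 : Int)) d).get? y).getD 0) ≤ B := by
    intro l
    induction l with
    | nil => intro d B _ hd _ y; exact hd y
    | cons p l ih =>
      intro d B hB hd hl y
      simp only [List.foldl_cons]
      refine ih _ B hB ?_ (fun q hq => hl q (by simp [hq])) y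
      intro z
      by_cases hz : z = p.2
      · subst hz
        rw [PySem.Dict.get?_insert_self]
        simpa using hl p (by simp)
      · rw [PySem.Dict.get?_insert_of_ne _ _ hz]
        exact hd z
  have henum : ∀ p ∈ PySem.List.enumerate a, (p.1 : Int) ≤ (a.length : Int) := by
    intro p hp
    rw [PySem.List.mem_enumerate_iff] at hp
    obtain ⟨k, hk, rfl⟩ := hp
    simp; omega
  exact key (PySem.List.enumerate a) PySem.Dict.empty (a.length : Int)
    (by positivity) (by intro y; simp [PySem.Dict.get?_empty]) henum x

-- counting run: while reach = e exceeds the index, each position counts 1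
lemma pvRun (P : List Int) (e : Int) (he : e.toNat ≤ P.length) (he0 : 0 ≤ e) :
    ∀ (k j : Nat), e.toNat - j ≤ k → j ≤ e.toNat →
      pvScan (P.drop j) (j : Int) e = (e - j) + pvScan (P.drop e.toNat) e e := by
  intro k
  induction k with
  | zero =>
    intro j hk hj
    have : j = e.toNat := by omega
    subst this
    have : ((e.toNat : Nat) : Int) = e := by omega
    rw [this]; omega
  | succ k ih =>
    intro j hk hj
    by_cases hje : j = e.toNat
    · subst hje
      have : ((e.toNat : Nat) : Int) = e := by omega
      rw [this]; omega
    · have hjl : j < P.length := by omega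
      rw [List.drop_eq_getElem_cons hjl]
      simp only [pvScan]
      rw [if_pos (by omega)]
      have h2 := ih (j + 1) (by omega) (by omega)
      push_cast at h2 ⊢
      rw [h2]; ring

-- Step 2: the counter scan from a reset point equals B's pointer jump
lemma pvScanJump (P : List Int) (hb : ∀ p ∈ P, p ≤ (P.length : Int)) :
    ∀ (k s : Nat) (reach : Int), P.length - s ≤ k → reach ≤ (s : Int) →
      pvScan (P.drop s) (s : Int) reach = pvJump P s := by
  intro k
  induction k with
  | zero =>
    intro s reach hk hr
    have hs : ¬ s < P.length := by omega
    rw [List.drop_eq_nil_of_le (by omega)]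
    rw [pvJump, dif_neg hs]
    simp [pvScan]
  | succ k ih =>
    intro s reach hk hr
    by_cases hs : s < P.length
    · rw [List.drop_eq_getElem_cons hs]
      simp only [pvScan]
      rw [if_neg (by omega)]
      rw [pvJump, dif_pos hs]
      set e := P[s] with hedef
      have heB : e ≤ (P.length : Int) := hb e (List.getElem_mem hs)
      by_cases hse : e ≤ (s : Int)
      · rw [if_pos hse]
        exact ih (s + 1) e (by omega) (by omega)
      · rw [if_neg hse]
        have he0 : 0 ≤ e := by omega
        have heL : e.toNat ≤ P.length := by omega
        have hrun := pvRun P e heL he0 (e.toNat - (s+1)) (s + 1) (by omega) (by omega)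
        push_cast at hrun ⊢
        rw [hrun]
        have hscan : pvScan (P.drop e.toNat) e e = pvJump P e.toNat := by
          have hcast : ((e.toNat : Nat) : Int) = e := by omega
          have h3 := ih e.toNat e (by omega) (by omega)
          rwa [hcast] at h3
        rw [hscan]
        ring
    · rw [List.drop_eq_nil_of_le (by omega)]
      rw [pvJump, dif_neg hs]
      simp [pvScan]

-- ===== VERDICT (by name: the statement is the Claim_ definition above) =====
theorem max_color_sum_spec : Claim_equal_max_color_sum := by
  intro n a _
  show max_color_sum n a = max_color_sum_alt n a
  simp only [max_color_sum, max_color_sum_alt, pvLastOccB]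
  rw [pvALoop_scan]
  set P := pvBuildP (pvLastOcc a) a 0 with hP
  have hlen : P.length = a.length := pvBuildP_length _ _ _
  have hb : ∀ p ∈ P, p ≤ (P.length : Int) := by
    rw [hlen]
    exact pvBuildP_bound _ _ (pvLastOcc_bound a) a 0 (by positivity)
  have := pvScanJump P hb P.length 0 0 (by omega) (by omega)
  simpa using this
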